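-- pv_equiv track=rewrite | github.com/rasbt/siteinterlock | siteinterlock/proflex_utils/hether.py | _cluster_mapping
-- ===== SOURCE A (Python) =====
-- def _cluster_mapping(calpha_idx, cluster_idx):
--     """
--     Parameters
--     ------------
--     calpha_idx : list
--        List of integers containing the index positions
--        of C-alpha atoms as returned from
--        `read_pflexdataset(...)`.
--        len(calpha_idx) < len(cluster_idx)
--     cluster_idx : list
--        List of cluster indeces (integers) as given for
--        each decomposition in Proflex's decomp_list file.
--
--     Returns
--     ------------
--     clusters_count : dict
--        A dictionary counting the number of
--        C-alpha atoms per cluster index.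
--
--     """
--     assert(len(calpha_idx) <= len(cluster_idx))
--
--     calpha_clusters = [cluster_idx[idx] for idx in calpha_idx]
--     clusters_count = {}
--     for idx in calpha_clusters:
--         if idx not in clusters_count:
--             clusters_count[idx] = 1
--         else:
--             clusters_count[idx] += 1
--
--     return clusters_count
-- ===== SOURCE B (Python) =====
-- def _cluster_mapping(calpha_idx, cluster_idx):
--     assert(len(calpha_idx) <= len(cluster_idx))
--     vals = [cluster_idx[idx] for idx in calpha_idx]
--
--     def go(vs):
--         # partition counting: peel off the first value, count it as the
--         # number of elements removed by filtering it out, recurse on the rest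
--         if not vs:
--             return {}
--         key = vs[0]
--         rest = [v for v in vs if v != key]
--         counts = {key: len(vs) - len(rest)}
--         counts.update(go(rest))
--         return counts
--
--     return go(vals)
-- ===== Notes on version B (the rewrite author's own statement) =====
-- stated objective: alternative
-- what changed: Replaces A's single-pass dict tally with recursive partition counting: peel the first value off the mapped list, obtain its count as the length drop after filtering it out, and recurse on the filtered remainder (quickselect-style partitioning, no incremental counter).
import Mathlib
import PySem

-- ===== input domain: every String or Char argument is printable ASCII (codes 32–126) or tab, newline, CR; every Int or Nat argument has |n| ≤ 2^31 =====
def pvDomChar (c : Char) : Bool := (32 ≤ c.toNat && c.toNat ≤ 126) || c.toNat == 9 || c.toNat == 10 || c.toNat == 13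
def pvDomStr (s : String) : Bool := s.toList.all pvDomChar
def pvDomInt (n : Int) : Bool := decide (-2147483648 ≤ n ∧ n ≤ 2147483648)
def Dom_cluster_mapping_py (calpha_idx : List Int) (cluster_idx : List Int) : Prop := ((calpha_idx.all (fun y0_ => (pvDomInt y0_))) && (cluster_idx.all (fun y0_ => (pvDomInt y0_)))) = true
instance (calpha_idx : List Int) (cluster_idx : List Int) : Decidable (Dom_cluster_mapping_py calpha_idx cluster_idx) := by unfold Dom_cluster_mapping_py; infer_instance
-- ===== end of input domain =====

-- B replaces A's incremental dict tally with recursive partition counting (filter-out-the-head recursion); same dict, no speed claim.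


-- ===== PORT A =====
def cluster_mapping_py (calpha_idx : List Int) (cluster_idx : List Int) : List (Int × Int) :=
  -- calpha_clusters = [cluster_idx[idx] for idx in calpha_idx]  (Pre_ keeps every idx in range)
  let calpha_clusters := calpha_idx.map (fun idx => PySem.List.pyGetD cluster_idx idx 0)
  -- for idx in calpha_clusters: if idx not in clusters_count: … = 1 else: … += 1
  let clusters_count := calpha_clusters.foldl
    (fun d idx =>
      if d.contains idx = false then d.insert idx 1
      else d.insert idx (d.getD idx 0 + 1))
    (PySem.Dict.empty : PySem.Dict Int Int)
  clusters_count.items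

-- ===== PORT B =====
-- go(vs): counts = {key: len(vs)-len(rest)}; counts.update(go(rest)).  Since every key of
-- go(rest) differs from key, the dict built is key-first concatenation: a cons on the items list.
def goCount (vs : List Int) : List (Int × Int) :=
  match vs with
  | [] => []
  | v :: t =>
    let rest := (v :: t).filter (fun x => x != v)
    (v, ((v :: t).length : Int) - (rest.length : Int)) :: goCount rest
termination_by vs.length
decreasing_by
  simp
  exact List.length_filter_le _ t

def cluster_mapping_py_alt (calpha_idx : List Int) (cluster_idx : List Int) : List (Int × Int) :=
  let vals := calpha_idx.map (fun idx => PySem.List.pyGetD cluster_idx idx 0)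
  goCount vals

-- ===== PRECONDITION & SPEC =====
-- Pre_ excludes exactly the inputs on which A raises: AssertionError when len(calpha_idx) > len(cluster_idx),
-- and IndexError when some index in calpha_idx is out of range for cluster_idx (Python negative indexing allowed).
def Pre_cluster_mapping_py (calpha_idx : List Int) (cluster_idx : List Int) : Prop :=
  calpha_idx.length ≤ cluster_idx.length ∧
  ∀ idx ∈ calpha_idx, -(cluster_idx.length : Int) ≤ idx ∧ idx < (cluster_idx.length : Int)
instance (calpha_idx : List Int) (cluster_idx : List Int) : Decidable (Pre_cluster_mapping_py calpha_idx cluster_idx) := by unfold Pre_cluster_mapping_py; infer_instance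

def pvWitness_cluster_mapping_py : List Int × List Int := ([0, 2, -1, 0], [5, 6, 5, 7])

def Spec_cluster_mapping_py (calpha_idx : List Int) (cluster_idx : List Int) (out : List (Int × Int)) : Prop := out = cluster_mapping_py_alt calpha_idx cluster_idx
instance (calpha_idx : List Int) (cluster_idx : List Int) (out : List (Int × Int)) : Decidable (Spec_cluster_mapping_py calpha_idx cluster_idx out) := by unfold Spec_cluster_mapping_py; infer_instance

-- ===== CLAIM =====
def Claim_equal_cluster_mapping_py : Prop := ∀ (calpha_idx : List Int) (cluster_idx : List Int), Dom_cluster_mapping_py calpha_idx cluster_idx → Pre_cluster_mapping_py calpha_idx cluster_idx → Spec_cluster_mapping_py calpha_idx cluster_idx (cluster_mapping_py calpha_idx cluster_idx)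

-- ===== LEMMAS AND PROOFS =====

-- A's loop body equals the Counter step: when the key is absent, getD is 0, so 'insert k 1' is 'insert k (getD+1)'.
theorem cluster_mapping_fold_eq_counter (vals : List Int) :
    vals.foldl
      (fun (d : PySem.Dict Int Int) idx =>
        if d.contains idx = false then d.insert idx 1
        else d.insert idx (d.getD idx 0 + 1))
      PySem.Dict.empty
    = PySem.Dict.counter vals := by
  rw [← PySem.Dict.foldl_insert_getD_add_one_eq_counter]
  apply PySem.List.foldl_congr_mem
  intro d idx _
  by_cases h : d.contains idx = false
  · rw [if_pos h, PySem.Dict.getD_of_not_contains d 0 h]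
    norm_num
  · simp [h]

-- adding an element already in the set is a no-op through the whole fold: filtering out v changes nothing
theorem foldl_add_filter (v : Int) (t : List Int) :
    ∀ s : PySem.Set Int, v ∈ s →
      t.foldl PySem.Set.add s = (t.filter (fun x => x != v)).foldl PySem.Set.add s := by
  induction t with
  | nil => intro s _; rfl
  | cons x t ih =>
    intro s hv
    by_cases hx : x = v
    · subst hx
      have hadd : PySem.Set.add s x = s := by
        simp [PySem.Set.add, hv]
      simpa [hadd] using ih s hv
    · have hb : (x != v) = true := by simp [hx]
      simp only [List.filter_cons, hb, List.foldl_cons]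
      exact ih _ ((PySem.Set.mem_add _ _ _).mpr (Or.inl hv))

-- a cons at the front of the accumulator commutes out of the fold when its element never recurs
theorem foldl_add_cons (v : Int) (t : List Int) :
    ∀ s : PySem.Set Int, v ∉ t →
      t.foldl PySem.Set.add (v :: s) = v :: t.foldl PySem.Set.add s := by
  induction t with
  | nil => intro s _; rfl
  | cons x t ih =>
    intro s hv
    have hxv : x ≠ v := fun h => hv (h ▸ List.mem_cons_self)
    have hstep : PySem.Set.add (v :: s) x = v :: PySem.Set.add s x := by
      have hbe : (x == v) = false := by simp [hxv]
      simp only [PySem.Set.add, PySem.Set.contains, List.contains_cons, hbe, Bool.false_or]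
      split <;> simp_all
    simp only [List.foldl_cons, hstep]
    exact ih _ (fun h => hv (List.mem_cons_of_mem _ h))

theorem ofList_cons_filter (v : Int) (t : List Int) :
    PySem.Set.ofList (v :: t) = v :: PySem.Set.ofList (t.filter (fun x => x != v)) := by
  show List.foldl PySem.Set.add (PySem.Set.add [] v) t = _
  have h1 : PySem.Set.add ([] : PySem.Set Int) v = [v] := rfl
  rw [h1, foldl_add_filter v t [v] (List.mem_singleton.mpr rfl),
      foldl_add_cons v _ ([] : PySem.Set Int) (by simp)]
  rfl

-- the head's count is the length removed by filtering it out
theorem count_eq_length_sub (v : Int) (vs : List Int) :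
    ((vs.length : Int) - ((vs.filter (fun x => x != v)).length : Int)) = (vs.count v : Int) := by
  have h := List.length_eq_countP_add_countP (fun x => x != v) (l := vs)
  have h2 : List.countP (fun a => decide (¬((a != v) = true))) vs = vs.count v := by
    rw [List.count_eq_countP]
    apply List.countP_congr
    intro a _
    by_cases ha : a = v <;> simp [ha]
  have h3 : List.countP (fun x => x != v) vs = (vs.filter (fun x => x != v)).length :=
    List.countP_eq_length_filter
  rw [h2, h3] at h
  omega

theorem count_filter_ne (v k : Int) (hk : k ≠ v) (t : List Int) :
    (t.filter (fun x => x != v)).count k = t.count k := by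
  induction t with
  | nil => rfl
  | cons x t ih =>
    by_cases hx : x = v
    · subst hx
      have h1 : List.count k (x :: t) = List.count k t := List.count_cons_of_ne (Ne.symm hk)
      simp only [List.filter_cons, bne_self_eq_false]
      simpa [h1] using ih
    · have hb : (x != v) = true := by simp [hx]
      simp [hb, List.count_cons, ih]

-- B's recursion computes exactly Counter(vs).items
theorem goCount_eq_counter_items (vs : List Int) :
    goCount vs = (PySem.Set.ofList vs).map (fun k => (k, (vs.count k : Int))) := by
  induction hn : vs.length using Nat.strong_induction_on generalizing vs with
  | _ n ih =>
    match vs with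
    | [] => rw [goCount]; rfl
    | v :: t =>
      rw [goCount]
      have hrest : (v :: t).filter (fun x => x != v) = t.filter (fun x => x != v) := by
        simp
      have hlen : (t.filter (fun x => x != v)).length < n := by
        subst hn
        exact Nat.lt_succ_of_le (List.length_filter_le _ t)
      simp only [hrest]
      rw [ih _ hlen _ rfl, ofList_cons_filter, List.map_cons]
      have hc := count_eq_length_sub v (v :: t)
      rw [hrest] at hc
      refine congrArg₂ List.cons ?_ ?_
      · show (v, ((v :: t).length : Int) - ((t.filter (fun x => x != v)).length : Int))
            = (v, ((v :: t).count v : Int))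
        rw [hc]
      · apply List.map_congr_left
        intro k hk
        have hkmem : k ∈ t.filter (fun x => x != v) := by simpa using hk
        have hkv : k ≠ v := by
          have := List.of_mem_filter hkmem
          simpa using this
        show (k, ((t.filter (fun x => x != v)).count k : Int)) = (k, ((v :: t).count k : Int))
        rw [count_filter_ne v k hkv, List.count_cons_of_ne (Ne.symm hkv)]

-- ===== VERDICT =====
theorem cluster_mapping_py_spec : Claim_equal_cluster_mapping_py := by
  intro calpha_idx cluster_idx _ _
  unfold Spec_cluster_mapping_py cluster_mapping_py cluster_mapping_py_alt
  dsimp only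
  rw [cluster_mapping_fold_eq_counter, PySem.Dict.items_counter, goCount_eq_counter_items]
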